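-- pv_equiv track=rewrite | github.com/2lu3/md-tools | pytool/pytool/selection/alpha_helix.py | _merge_ss
-- ===== SOURCE A (Python) =====
-- def _merge_ss(ss_list: list[str], method: str):
--     if not ss_list:
--         raise ValueError("ss_list must not be empty")
--
--     # all ss should be same length
--     ss_length_list = [len(ss) for ss in ss_list]
--     if len(set(ss_length_list)) != 1:
--         raise ValueError("All secondary structures should be same length")
--     ss_length = ss_length_list[0]
--
--     merged_ss = ""
--     if method == "all":
--         for i in range(ss_length):
--             if all(ss[i] == "H" for ss in ss_list):
--                 merged_ss += "H"
--             else: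
--                 merged_ss += "-"
--     elif method == "any":
--         for i in range(ss_length):
--             if any(ss[i] == "H" for ss in ss_list):
--                 merged_ss += "H"
--             else:
--                 merged_ss += "-"
--     else:
--         raise NotImplementedError
--
--     return merged_ss
-- ===== SOURCE B (Python) =====
-- def _merge_ss(ss_list: list[str], method: str):
--     if not ss_list:
--         raise ValueError("ss_list must not be empty")
--
--     n = len(ss_list[0])
--     if any(len(ss) != n for ss in ss_list):
--         raise ValueError("All secondary structures should be same length")
--
--     if method == "all":
--         mask = [True] * n
--         for ss in ss_list:
--             for i, c in enumerate(ss):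
--                 mask[i] = mask[i] and c == "H"
--     elif method == "any":
--         mask = [False] * n
--         for ss in ss_list:
--             for i, c in enumerate(ss):
--                 mask[i] = mask[i] or c == "H"
--     else:
--         raise NotImplementedError
--
--     return "".join("H" if b else "-" for b in mask)
-- ===== Notes on version B (the rewrite author's own statement) =====
-- stated objective: alternative
-- what changed: Row-major single pass maintaining a running boolean per-column mask (AND/OR fold over rows), instead of A's column-major loop that re-scans every string for each index; result built once with join instead of repeated string concatenation.
import Mathlib
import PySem

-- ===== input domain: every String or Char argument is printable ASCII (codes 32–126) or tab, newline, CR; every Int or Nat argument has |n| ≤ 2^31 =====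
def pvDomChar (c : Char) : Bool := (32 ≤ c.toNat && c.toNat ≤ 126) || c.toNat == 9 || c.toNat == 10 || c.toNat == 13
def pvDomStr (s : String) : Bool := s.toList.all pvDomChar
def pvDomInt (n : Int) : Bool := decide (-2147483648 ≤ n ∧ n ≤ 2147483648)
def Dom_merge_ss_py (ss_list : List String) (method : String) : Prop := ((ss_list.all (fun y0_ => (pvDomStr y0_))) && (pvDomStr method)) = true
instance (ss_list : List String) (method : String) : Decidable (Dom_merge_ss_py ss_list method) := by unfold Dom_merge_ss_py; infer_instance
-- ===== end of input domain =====

-- B merges the structures row-by-row into a running per-column boolean mask (AND/OR fold over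
-- the rows) instead of A's column-major loop that rescans every string at each index.

-- ===== PORT A =====
-- A, transliterated; on inputs where A raises (outside Pre_) the port returns "".
def merge_ss_py (ss_list : List String) (method : String) : String :=
  if ss_list = [] then "" else
  -- ss_length_list = ss_list.map (fun ss => PySem.Str.len ss); ss_length = its head (inlined)
  if PySem.Set.len (PySem.Set.ofList (ss_list.map (fun ss => PySem.Str.len ss))) ≠ 1 then "" else
  if method = "all" then
    String.ofList ((PySem.List.pyRange 0 ((ss_list.map (fun ss => PySem.Str.len ss)).headD 0) 1).foldl
      (fun merged i =>
        if ss_list.all (fun ss => PySem.Str.pyGet? ss i == some 'H')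
        then merged ++ ['H'] else merged ++ ['-']) [])
  else if method = "any" then
    String.ofList ((PySem.List.pyRange 0 ((ss_list.map (fun ss => PySem.Str.len ss)).headD 0) 1).foldl
      (fun merged i =>
        if ss_list.any (fun ss => PySem.Str.pyGet? ss i == some 'H')
        then merged ++ ['H'] else merged ++ ['-']) [])
  else ""

-- ===== PORT B =====
def merge_ss_py_alt (ss_list : List String) (method : String) : String :=
  if ss_list = [] then "" else
  -- n = len(first string); mask = row-fold of AND/OR into a width-n boolean accumulator (inlined)
  if ss_list.any (fun ss => ss.toList.length ≠ (ss_list.headD "").toList.length) then "" else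
  if method = "all" then
    String.ofList ((ss_list.foldl
      (fun m ss => List.zipWith (fun b c => b && (c == 'H')) m ss.toList)
      (List.replicate (ss_list.headD "").toList.length true)).map (fun b => if b then 'H' else '-'))
  else if method = "any" then
    String.ofList ((ss_list.foldl
      (fun m ss => List.zipWith (fun b c => b || (c == 'H')) m ss.toList)
      (List.replicate (ss_list.headD "").toList.length false)).map (fun b => if b then 'H' else '-'))
  else ""

-- ===== PRECONDITION & SPEC =====
-- Pre_ excludes exactly the inputs on which A raises: empty ss_list (ValueError),
-- unequal string lengths (ValueError), and a method other than "all"/"any" (NotImplementedError).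
def Pre_merge_ss_py (ss_list : List String) (method : String) : Prop :=
  ss_list ≠ [] ∧
  (∀ ss ∈ ss_list, ss.toList.length = (ss_list.headD "").toList.length) ∧
  (method = "all" ∨ method = "any")
instance (ss_list : List String) (method : String) : Decidable (Pre_merge_ss_py ss_list method) := by
  unfold Pre_merge_ss_py; infer_instance
def pvWitness_merge_ss_py : List String × String := (["HH-H", "H--H", "HHEH"], "all")

def Spec_merge_ss_py (ss_list : List String) (method : String) (out : String) : Prop := out = merge_ss_py_alt ss_list method
instance (ss_list : List String) (method : String) (out : String) : Decidable (Spec_merge_ss_py ss_list method out) := by unfold Spec_merge_ss_py; infer_instance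

-- ===== CLAIM (what is proved, stated in full; the proofs are below) =====
def Claim_equal_merge_ss_py : Prop := ∀ (ss_list : List String) (method : String), Dom_merge_ss_py ss_list method → Pre_merge_ss_py ss_list method → Spec_merge_ss_py ss_list method (merge_ss_py ss_list method)

-- ===== LEMMAS AND PROOFS =====

-- A's snoc-building loop over any index list is the map of its column test.
theorem pvSnocFold {α : Type} (l : List α) (p : α → Bool) (acc : List Char) :
    l.foldl (fun m i => if p i then m ++ ['H'] else m ++ ['-']) acc
      = acc ++ l.map (fun i => if p i then 'H' else '-') := by
  induction l generalizing acc with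
  | nil => simp
  | cons x xs ih => cases h : p x <;> simp [List.foldl_cons, h, ih]

-- one zipWith step of B, on a mask given as a map over range
theorem pvZipStep (op : Bool → Bool → Bool) (r : List Char) (n : Nat) (hr : r.length = n)
    (f : Nat → Bool) :
    List.zipWith (fun b c => op b (c == 'H')) ((List.range n).map f) r
      = (List.range n).map (fun k => op (f k) (r.getD k ' ' == 'H')) := by
  apply List.ext_getElem
  · simp [hr]
  · intro i h1 h2
    simp only [List.getElem_zipWith, List.getElem_map, List.getElem_range]
    rw [List.getD_eq_getElem r ' ' (by simp at h2; omega)]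

theorem pvMaskAll (rows : List (List Char)) (n : Nat) (hr : ∀ r ∈ rows, r.length = n)
    (f : Nat → Bool) :
    rows.foldl (fun m r => List.zipWith (fun b c => b && (c == 'H')) m r) ((List.range n).map f)
      = (List.range n).map (fun k => f k && rows.all (fun r => r.getD k ' ' == 'H')) := by
  induction rows generalizing f with
  | nil => simp
  | cons r rows ih =>
    rw [List.foldl_cons, pvZipStep (fun a b => a && b) r n (hr r (by simp)) f,
      ih (fun r h => hr r (by simp [h]))]
    simp [Bool.and_assoc]

theorem pvMaskAny (rows : List (List Char)) (n : Nat) (hr : ∀ r ∈ rows, r.length = n)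
    (f : Nat → Bool) :
    rows.foldl (fun m r => List.zipWith (fun b c => b || (c == 'H')) m r) ((List.range n).map f)
      = (List.range n).map (fun k => f k || rows.any (fun r => r.getD k ' ' == 'H')) := by
  induction rows generalizing f with
  | nil => simp
  | cons r rows ih =>
    rw [List.foldl_cons, pvZipStep (fun a b => a || b) r n (hr r (by simp)) f,
      ih (fun r h => hr r (by simp [h]))]
    simp [Bool.or_assoc]

theorem pvSetConstAux (L : Int) (k : Nat) :
    (List.replicate k L).foldl PySem.Set.add [L] = [L] := by
  induction k with
  | zero => rfl
  | succ k ih => rw [List.replicate_succ, List.foldl_cons]; simpa [PySem.Set.add, PySem.Set.contains] using ih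

theorem pvSetConst (L : Int) (k : Nat) :
    PySem.Set.ofList (List.replicate (k + 1) L) = [L] := by
  rw [PySem.Set.ofList_eq_foldl, List.replicate_succ, List.foldl_cons]
  simpa [PySem.Set.add, PySem.Set.contains] using pvSetConstAux L k

theorem pvBeqSome (x y : Char) : (some x == some y) = (x == y) := rfl

-- the two column tests agree on in-range columns
theorem pvColEq (ss_list : List String) (n k : Nat) (hk : k < n)
    (hlen : ∀ ss ∈ ss_list, ss.toList.length = n) :
    (ss_list.all (fun ss => ss.toList[(k : Nat)]? == some 'H'))
      = (ss_list.all (fun ss => ss.toList.getD k ' ' == 'H')) := by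
  induction ss_list with
  | nil => rfl
  | cons s l ih =>
    have hs : s.toList.length = n := hlen s (by simp)
    have hkl : k < s.toList.length := by omega
    rw [List.all_cons, List.all_cons, ih (fun ss h => hlen ss (by simp [h]))]
    rw [List.getElem?_eq_getElem hkl, List.getD_eq_getElem s.toList ' ' hkl, pvBeqSome]

theorem pvColEqAny (ss_list : List String) (n k : Nat) (hk : k < n)
    (hlen : ∀ ss ∈ ss_list, ss.toList.length = n) :
    (ss_list.any (fun ss => ss.toList[(k : Nat)]? == some 'H'))
      = (ss_list.any (fun ss => ss.toList.getD k ' ' == 'H')) := by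
  induction ss_list with
  | nil => rfl
  | cons s l ih =>
    have hs : s.toList.length = n := hlen s (by simp)
    have hkl : k < s.toList.length := by omega
    rw [List.any_cons, List.any_cons, ih (fun ss h => hlen ss (by simp [h]))]
    rw [List.getElem?_eq_getElem hkl, List.getD_eq_getElem s.toList ' ' hkl, pvBeqSome]

-- ===== VERDICT (by name: the statement is the Claim_ definition above) =====
theorem merge_ss_py_spec : Claim_equal_merge_ss_py := by
  intro ss_list method _ hpre
  obtain ⟨hne, hlen, hm⟩ := hpre
  unfold Spec_merge_ss_py merge_ss_py merge_ss_py_alt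
  set n : Nat := (ss_list.headD "").toList.length with hn
  rw [if_neg hne, if_neg hne]
  obtain ⟨k, hk⟩ : ∃ k, ss_list.length = k + 1 := by
    cases ss_list with
    | nil => exact absurd rfl hne
    | cons a l => exact ⟨l.length, by simp⟩
  have hmapl : ss_list.map (fun ss => PySem.Str.len ss) = List.replicate (k + 1) (n : Int) := by
    rw [List.eq_replicate_iff]
    constructor
    · simpa using hk
    intro b hb
    obtain ⟨ss, hss, hrfl⟩ := List.mem_map.mp hb
    rw [← hrfl]
    simp [PySem.Str.len, hlen ss hss]
  have hA : ¬(PySem.Set.len (PySem.Set.ofList (ss_list.map (fun ss => PySem.Str.len ss))) ≠ 1) := by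
    rw [hmapl, pvSetConst]
    simp [PySem.Set.len]
  have hB : ¬((ss_list.any fun ss => decide (ss.toList.length ≠ n)) = true) := by
    intro hcon
    rw [List.any_eq_true] at hcon
    obtain ⟨ss, hss, hc⟩ := hcon
    have hc' : ss.toList.length ≠ n := by simpa using hc
    exact hc' (hlen ss hss)
  rw [if_neg hA, if_neg hB, hmapl]
  have hrows : ∀ r ∈ ss_list.map String.toList, r.length = n := by
    intro r hr
    obtain ⟨ss, hss, hrfl⟩ := List.mem_map.mp hr
    rw [← hrfl]; exact hlen ss hss
  have hrange : PySem.List.pyRange 0 ((List.replicate (k + 1) ((n : Nat) : Int)).headD 0) 1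
      = (List.range n).map (fun (j : Nat) => (j : Int)) := by
    rw [List.replicate_succ, List.headD_cons, PySem.List.pyRange_one]
    simp only [sub_zero, Int.toNat_natCast, zero_add]
  have hget : ∀ (j : Nat) (ss : String), (PySem.Str.pyGet? ss (j : Int) == some 'H')
      = (ss.toList[(j : Nat)]? == some 'H') := fun j ss => by simp
  rcases hm with hm | hm <;> rw [hm] <;> simp only [String.reduceEq, reduceIte]
  · -- method = "all"
    rw [hrange, List.foldl_map,
      pvSnocFold (List.range n)
        (fun kk => ss_list.all (fun ss => PySem.Str.pyGet? ss ((kk : Nat) : Int) == some 'H')) []]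
    have hmask : ss_list.foldl
        (fun m ss => List.zipWith (fun b c => b && (c == 'H')) m ss.toList)
        (List.replicate n true)
        = (List.range n).map (fun j => ss_list.all (fun ss => ss.toList.getD j ' ' == 'H')) := by
      have h0 : (List.replicate n true) = (List.range n).map (fun _ => true) := by simp
      rw [h0, ← List.foldl_map (f := String.toList), pvMaskAll _ n hrows]
      simp only [List.all_map, Bool.true_and]
      rfl
    rw [hmask, List.map_map, List.nil_append]
    apply congrArg String.ofList
    apply List.map_congr_left
    intro j hj
    simp only [Function.comp_apply]
    have hc : (ss_list.all fun ss => PySem.Str.pyGet? ss ((j : Nat) : Int) == some 'H')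
        = (ss_list.all fun ss => ss.toList.getD j ' ' == 'H') := by
      rw [show (fun ss => PySem.Str.pyGet? ss ((j : Nat) : Int) == some 'H')
            = (fun ss : String => ss.toList[(j : Nat)]? == some 'H') from funext (hget j)]
      exact pvColEq ss_list n j (List.mem_range.mp hj) hlen
    rw [hc]
  · -- method = "any"
    rw [hrange, List.foldl_map,
      pvSnocFold (List.range n)
        (fun kk => ss_list.any (fun ss => PySem.Str.pyGet? ss ((kk : Nat) : Int) == some 'H')) []]
    have hmask : ss_list.foldl
        (fun m ss => List.zipWith (fun b c => b || (c == 'H')) m ss.toList)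
        (List.replicate n false)
        = (List.range n).map (fun j => ss_list.any (fun ss => ss.toList.getD j ' ' == 'H')) := by
      have h0 : (List.replicate n false) = (List.range n).map (fun _ => false) := by simp
      rw [h0, ← List.foldl_map (f := String.toList), pvMaskAny _ n hrows]
      simp only [List.any_map, Bool.false_or]
      rfl
    rw [hmask, List.map_map, List.nil_append]
    apply congrArg String.ofList
    apply List.map_congr_left
    intro j hj
    simp only [Function.comp_apply]
    have hc : (ss_list.any fun ss => PySem.Str.pyGet? ss ((j : Nat) : Int) == some 'H')
        = (ss_list.any fun ss => ss.toList.getD j ' ' == 'H') := by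
      rw [show (fun ss => PySem.Str.pyGet? ss ((j : Nat) : Int) == some 'H')
            = (fun ss : String => ss.toList[(j : Nat)]? == some 'H') from funext (hget j)]
      exact pvColEqAny ss_list n j (List.mem_range.mp hj) hlen
    rw [hc]
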